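-- pv_equiv track=rewrite | github.com/jkugelman/crossword | wordlists/sudoku.py | build_match_table
-- ===== SOURCE A (Python) =====
-- from itertools import combinations, permutations
--
-- def build_match_table(letters, word_list):
--     match_table = dict()
--
--     for length in range(3):
--         for prefix in permutations(letters, length):
--             prefix = ''.join(prefix)
--             pattern = prefix + ('.' * (3 - length))
--             matches = {word for word in word_list if word.startswith(prefix)}
--             match_table[pattern] = matches
--
--     return match_table
-- ===== SOURCE B (Python) =====
-- def build_match_table(letters, word_list):
--     # Dedupe the words once, then bucket them by their 1- and 2-char prefixes in a
--     # single pass; each pattern's set is then assembled by one dict lookup instead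
--     # of a scan over the whole word list.
--     words = list(dict.fromkeys(word_list))
--     by1 = {}
--     by2 = {}
--     for w in words:
--         by1.setdefault(w[:1], []).append(w)
--         by2.setdefault(w[:2], []).append(w)
--     table = {'...': set(words)}
--     n = len(letters)
--     for i in range(n):
--         table[letters[i] + '..'] = set(by1.get(letters[i], []))
--     for i in range(n):
--         for j in range(n):
--             if i != j:
--                 p = letters[i] + letters[j]
--                 table[p + '.'] = set(by2.get(p, []))
--     return table
-- ===== Notes on version B (the rewrite author's own statement) =====
-- stated objective: faster
-- what changed: Instead of scanning the whole word list once per pattern (and building a set each time), B deduplicates the words once and buckets them by their 1- and 2-character prefixes in a single pass, so each pattern's set is assembled by one dict lookup.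
import Mathlib
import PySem

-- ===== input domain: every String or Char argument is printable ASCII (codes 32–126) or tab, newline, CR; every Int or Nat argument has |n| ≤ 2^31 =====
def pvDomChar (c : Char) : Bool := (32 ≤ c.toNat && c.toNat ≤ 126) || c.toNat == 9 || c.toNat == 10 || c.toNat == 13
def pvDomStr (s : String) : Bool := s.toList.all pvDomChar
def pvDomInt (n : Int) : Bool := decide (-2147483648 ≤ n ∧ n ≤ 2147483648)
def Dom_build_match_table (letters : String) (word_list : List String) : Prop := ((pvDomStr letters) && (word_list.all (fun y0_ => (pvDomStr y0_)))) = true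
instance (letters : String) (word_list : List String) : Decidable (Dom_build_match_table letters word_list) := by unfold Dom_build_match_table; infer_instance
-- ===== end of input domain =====

-- B buckets the deduplicated words once by their 1- and 2-character prefixes, so each
-- pattern's set is one dict lookup instead of a scan over the whole word list.

-- ===== PORT A =====
-- literal port of A: for length in range(3): for prefix in permutations(letters, length):
-- pattern = ''.join(prefix) + '.'*(3-length); matches = {word for word in word_list if word.startswith(prefix)}
def build_match_table (letters : String) (word_list : List String) : List (String × List String) :=
  ((PySem.List.pyRange 0 3 1).foldl (fun mt len =>
    (PySem.List.permutations letters.toList len.toNat).foldl (fun mt pr =>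
      let pre := String.ofList pr                                              -- ''.join(prefix)
      let pattern := String.ofList (pr ++ List.replicate (3 - len).toNat '.')  -- prefix + '.'*(3-length)
      let ms := PySem.Set.ofList (word_list.filter (fun w => PySem.Str.startswith w pre))
      mt.insert pattern ms) mt) PySem.Dict.empty).items

-- ===== PORT B =====
-- literal port of Source B: words = list(dict.fromkeys(word_list)); one bucketing pass keyed by
-- w[:1] / w[:2] (a slice with nonnegative bound is List.take — exact); then the three
-- insertion loops. letters[i] has 0 <= i < len(letters), always in range, so getD is exact.
def build_match_table_alt (letters : String) (word_list : List String) : List (String × List String) :=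
  let words := PySem.List.dedup word_list
  let by1 : PySem.Dict String (List String) :=
    words.foldl (fun d w => d.modify (String.ofList (w.toList.take 1)) [] (fun l => l ++ [w])) PySem.Dict.empty
  let by2 : PySem.Dict String (List String) :=
    words.foldl (fun d w => d.modify (String.ofList (w.toList.take 2)) [] (fun l => l ++ [w])) PySem.Dict.empty
  let table : PySem.Dict String (List String) :=
    (PySem.Dict.empty : PySem.Dict String (List String)).insert "..." (PySem.Set.ofList words)
  let n := letters.toList.length
  let table := (List.range n).foldl (fun t i =>
      let c := letters.toList.getD i ' '
      t.insert (String.ofList [c, '.', '.']) (PySem.Set.ofList (by1.getD (String.ofList [c]) []))) table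
  let table := (List.range n).foldl (fun t i =>
      (List.range n).foldl (fun t j =>
        if i ≠ j then
          let c1 := letters.toList.getD i ' '
          let c2 := letters.toList.getD j ' '
          t.insert (String.ofList [c1, c2, '.']) (PySem.Set.ofList (by2.getD (String.ofList [c1, c2]) []))
        else t) t) table
  table.items

-- ===== PRECONDITION & SPEC =====
def Spec_build_match_table (letters : String) (word_list : List String) (out : List (String × List String)) : Prop := out = build_match_table_alt letters word_list
instance (letters : String) (word_list : List String) (out : List (String × List String)) : Decidable (Spec_build_match_table letters word_list out) := by unfold Spec_build_match_table; infer_instance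

-- ===== CLAIM (what is proved, stated in full; the proofs are below) =====
def Claim_equal_build_match_table : Prop := ∀ (letters : String) (word_list : List String), Dom_build_match_table letters word_list → Spec_build_match_table letters word_list (build_match_table letters word_list)

-- ===== LEMMAS AND PROOFS =====

-- map (getD · d) over range = the list itself
theorem pv_map_getD_range {α} (L : List α) (d : α) :
    (List.range L.length).map (fun i => L.getD i d) = L := by
  induction L with
  | nil => rfl
  | cons a t ih =>
    simp only [List.length_cons, List.range_succ_eq_map, List.map_cons, List.map_map]
    simpa using ih

-- eraseIdx i = the elements at the other indices, in order
theorem pv_eraseIdx_eq_filter_range {α} (L : List α) (d : α) (i : Nat) (h : i < L.length) :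
    ((List.range L.length).filter (fun j => j ≠ i)).map (fun j => L.getD j d) = L.eraseIdx i := by
  induction L generalizing i with
  | nil => simp at h
  | cons a t ih =>
    cases i with
    | zero =>
      simp only [List.length_cons, List.range_succ_eq_map, List.eraseIdx_zero, List.tail_cons,
        List.filter_cons, List.filter_map, Function.comp_def]
      simp only [ne_eq, decide_not, decide_true, Bool.not_true, Bool.false_eq_true, if_false,
        Nat.succ_ne_zero, not_false_eq_true, List.filter_true,
        List.map_map, Function.comp_def, List.getD_cons_succ]
      exact pv_map_getD_range t d
    | succ m =>
      have hm : m < t.length := by simpa using h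
      simp only [List.length_cons, List.range_succ_eq_map, List.eraseIdx_cons_succ,
        List.filter_cons, List.filter_map, Function.comp_def]
      simp only [ne_eq, decide_not, if_true,
        Nat.zero_ne_add_one, not_false_eq_true, decide_true, List.map_cons, List.map_map,
        Function.comp_def, List.getD_cons_zero, List.getD_cons_succ]
      rw [show (fun (x : Nat) => !decide (x.succ = m + 1)) = (fun j => decide (j ≠ m)) by
        funext j; simp]
      rw [ih m hm]

-- itertools.permutations with r = 1 lists the elements
theorem pv_permutations_one {α} (L : List α) (d : α) :
    PySem.List.permutations L 1 = (List.range L.length).map (fun i => [L.getD i d]) := by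
  rw [PySem.List.permutations]
  rw [List.flatMap_congr (g := fun i => [[L.getD i d]]) ?_, ← List.map_eq_flatMap]
  intro i hi
  have hi' : i < L.length := List.mem_range.mp hi
  rw [List.getElem?_eq_getElem hi']
  show List.map _ (PySem.List.permutations _ 0) = _
  rw [show PySem.List.permutations (L.eraseIdx i) 0 = [[]] from rfl]
  simp [List.getElem?_eq_getElem hi']

-- itertools.permutations with r = 2 pairs each element with the rest
theorem pv_permutations_two {α} (L : List α) (d : α) :
    PySem.List.permutations L 2 =
      (List.range L.length).flatMap (fun i =>
        (L.eraseIdx i).map (fun c => [L.getD i d, c])) := by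
  rw [PySem.List.permutations]
  apply List.flatMap_congr
  intro i hi
  have hi' : i < L.length := List.mem_range.mp hi
  rw [List.getElem?_eq_getElem hi']
  show (PySem.List.permutations (L.eraseIdx i) 1).map _ = _
  rw [pv_permutations_one (L.eraseIdx i) d, List.map_map]
  conv_rhs => rw [← pv_map_getD_range (L.eraseIdx i) d]
  rw [List.map_map]
  simp [List.getElem?_eq_getElem hi', Function.comp_def]

-- ordered dedup commutes with filter
theorem pv_ofList_filter {α} [BEq α] [LawfulBEq α] (p : α → Bool) (xs : List α) :
    (PySem.Set.ofList xs).filter p = PySem.Set.ofList (xs.filter p) := by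
  induction xs with
  | nil => rfl
  | cons x t ih =>
    by_cases hp : p x = true
    · rw [PySem.Set.ofList_cons, List.filter_cons, if_pos hp, List.filter_cons, if_pos hp,
          PySem.Set.ofList_cons, ← ih]
      unfold PySem.Set.discard
      rw [List.filter_comm]
    · rw [PySem.Set.ofList_cons, List.filter_cons, if_neg hp, List.filter_cons, if_neg hp, ← ih]
      unfold PySem.Set.discard
      rw [List.filter_filter]
      apply List.filter_congr
      intro y _
      by_cases hy : y = x
      · subst hy; simp [hp]
      · simp [hy]

-- startswith = comparison with the taken prefix
theorem pv_startswith_eq_take (w p : String) :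
    PySem.Str.startswith w p = (String.ofList (w.toList.take p.toList.length) == p) := by
  apply Bool.coe_iff_coe.mp
  rw [PySem.Str.startswith_eq, beq_iff_eq, PySem.Chars.startswith_iff, List.prefix_iff_eq_take]
  constructor
  · intro h
    conv_rhs => rw [← @String.ofList_toList p]
    rw [String.ofList_inj]
    exact h.symm
  · intro h
    have := congrArg String.toList h
    simpa using this.symm

-- getD on B's bucket dict is a filter of the bucketed list
theorem pv_bucket_getD (key : String → String) (words : List String) (k : String) :
    ((words.foldl (fun d w => d.modify (key w) [] (fun l => l ++ [w])) PySem.Dict.empty).getD k []) =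
      words.filter (fun w => key w == k) := by
  have h1 : (words.foldl (fun d w => d.modify (key w) [] (fun l => l ++ [w])) PySem.Dict.empty)
      = ((words.map (fun w => (key w, w))).foldl
          (fun d (pr : String × String) => d.modify pr.1 [] (fun l => l ++ [pr.2])) PySem.Dict.empty) := by
    rw [List.foldl_map]
  rw [h1, PySem.Dict.getD_foldl_modify_append, List.filter_map]
  simp [Function.comp_def]

-- per-pattern value equality: A's scan set = B's bucket lookup set
theorem pv_val (word_list : List String) (pre : List Char) :
    PySem.Set.ofList (word_list.filter (fun w => PySem.Str.startswith w (String.ofList pre))) =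
      PySem.Set.ofList
        (((PySem.List.dedup word_list).foldl
            (fun d w => d.modify (String.ofList (w.toList.take pre.length)) [] (fun l => l ++ [w]))
            PySem.Dict.empty).getD (String.ofList pre) []) := by
  rw [pv_bucket_getD (fun w => String.ofList (w.toList.take pre.length))]
  have hq : (fun w => PySem.Str.startswith w (String.ofList pre))
      = (fun w => String.ofList (w.toList.take pre.length) == String.ofList pre) := by
    funext w
    rw [pv_startswith_eq_take w (String.ofList pre)]
    simp
  rw [hq, PySem.List.dedup_eq_ofList, pv_ofList_filter, PySem.Set.ofList_ofList]

-- a fold skipping j = i is a fold over the other indices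
theorem pv_foldl_ite {β : Type} (n i : Nat) (f : β → Nat → β) (t : β) :
    (List.range n).foldl (fun t j => if i ≠ j then f t j else t) t
      = ((List.range n).filter (fun j => j ≠ i)).foldl f t := by
  rw [List.foldl_filter]
  apply PySem.List.foldl_congr_mem _ _ _ _ ?_
  intro acc j _
  by_cases h : i = j
  · subst h; simp
  · simp [h, Ne.symm h]

-- stage 0: the '...' entry
theorem pv_stage0 (L : List Char) (wl : List String) :
    List.foldl
      (fun (mt : PySem.Dict String (List String)) pr =>
        mt.insert (String.ofList (pr ++ List.replicate (3 - (0 : Int)).toNat '.'))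
          (PySem.Set.ofList (List.filter (fun w => PySem.Str.startswith w (String.ofList pr)) wl)))
      PySem.Dict.empty (PySem.List.permutations L (Int.toNat 0))
    = PySem.Dict.empty.insert "..." (PySem.Set.ofList (PySem.List.dedup wl)) := by
  rw [show PySem.List.permutations L (Int.toNat 0) = [[]] from rfl, List.foldl_cons, List.foldl_nil]
  congr 1
  have h : (fun w => PySem.Str.startswith w (String.ofList [])) = fun (_ : String) => true := by
    funext w
    show PySem.Str.startswith w "" = true
    simp [pysem]
  rw [h, List.filter_true, PySem.List.dedup_eq_ofList, PySem.Set.ofList_ofList]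

-- stage 1: the single-letter entries
theorem pv_stage1 (L : List Char) (wl : List String) (d : PySem.Dict String (List String)) :
    List.foldl
      (fun (mt : PySem.Dict String (List String)) pr =>
        mt.insert (String.ofList (pr ++ List.replicate (3 - (1 : Int)).toNat '.'))
          (PySem.Set.ofList (List.filter (fun w => PySem.Str.startswith w (String.ofList pr)) wl)))
      d (PySem.List.permutations L (Int.toNat 1))
    = List.foldl
        (fun t i =>
          t.insert (String.ofList [L.getD i ' ', '.', '.'])
            (PySem.Set.ofList
              ((List.foldl (fun d w => d.modify (String.ofList (List.take 1 w.toList)) [] fun l => l ++ [w])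
                    PySem.Dict.empty (PySem.List.dedup wl)).getD (String.ofList [L.getD i ' ']) [])))
        d (List.range L.length) := by
  rw [show Int.toNat 1 = 1 from rfl, pv_permutations_one L ' ', List.foldl_map]
  apply PySem.List.foldl_congr_mem _ _ _ _ ?_
  intro acc i _
  congr 1
  rw [pv_val wl [L.getD i ' ']]
  rfl

-- stage 2: the two-letter entries
theorem pv_stage2 (L : List Char) (wl : List String) (d : PySem.Dict String (List String)) :
    List.foldl
      (fun (mt : PySem.Dict String (List String)) pr =>
        mt.insert (String.ofList (pr ++ List.replicate (3 - (2 : Int)).toNat '.'))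
          (PySem.Set.ofList (List.filter (fun w => PySem.Str.startswith w (String.ofList pr)) wl)))
      d (PySem.List.permutations L (Int.toNat 2))
    = List.foldl
        (fun t i =>
          List.foldl
            (fun t j =>
              if i ≠ j then
                t.insert (String.ofList [L.getD i ' ', L.getD j ' ', '.'])
                  (PySem.Set.ofList
                    ((List.foldl (fun d w => d.modify (String.ofList (List.take 2 w.toList)) [] fun l => l ++ [w])
                          PySem.Dict.empty (PySem.List.dedup wl)).getD
                      (String.ofList [L.getD i ' ', L.getD j ' ']) []))
              else t)
            t (List.range L.length))
        d (List.range L.length) := by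
  rw [show Int.toNat 2 = 2 from rfl, pv_permutations_two L ' ', List.foldl_flatMap]
  apply PySem.List.foldl_congr_mem _ _ _ _ ?_
  intro acc i hi
  have hi' : i < L.length := List.mem_range.mp hi
  rw [List.foldl_map, pv_foldl_ite, ← pv_eraseIdx_eq_filter_range L ' ' i hi', List.foldl_map]
  apply PySem.List.foldl_congr_mem _ _ _ _ ?_
  intro acc2 j _
  congr 1
  rw [pv_val wl [L.getD i ' ', L.getD j ' ']]
  rfl

-- ===== VERDICT (by name: the statement is the Claim_ definition above) =====
theorem build_match_table_spec : Claim_equal_build_match_table := by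
  intro letters word_list _
  unfold Spec_build_match_table build_match_table build_match_table_alt
  rw [show PySem.List.pyRange 0 3 1 = [0, 1, 2] from rfl]
  simp only [List.foldl_cons, List.foldl_nil]
  rw [pv_stage0 letters.toList word_list, pv_stage1 letters.toList word_list,
      pv_stage2 letters.toList word_list]
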